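-- pv_equiv track=rewrite | github.com/microsoft/AsgardBench | Magmathor/utils.py | is_sequence_looping
-- ===== SOURCE A (Python) =====
-- def is_sequence_looping(sequence: list, min_repetitions: int = 3) -> bool:
--     """
--     Detects if a sequence is looping by finding repeating patterns.
--
--     Args:
--         sequence: List of strings to check for looping patterns
--         min_repetitions: Minimum number of repetitions required to consider it a loop
--
--     Returns:
--         bool: True if a looping pattern is detected, False otherwise
--
--     Examples:
--         is_sequence_looping(['b', 'c', 'a', 'a', 'a', 'a']) -> True (pattern 'a' repeats 4 times)
--         is_sequence_looping(['b', 'c', 'a', 'd', 'c', 'a', 'd', 'c', 'a', 'd', 'c']) -> True (pattern 'cad' repeats 3 times)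
--         is_sequence_looping(['g', 'h', 'h', 'g', 'h', 'h', 'g', 'h', 'h']) -> True (pattern 'ghh' repeats 3 times)
--     """
--     if len(sequence) < min_repetitions:
--         return False
--
--     # Check for single element loops (most common case)
--     if len(sequence) >= min_repetitions:
--         last_element = sequence[-1]
--         count = 0
--         for i in range(len(sequence) - 1, -1, -1):
--             if sequence[i] == last_element:
--                 count += 1
--             else:
--                 break
--         if count >= min_repetitions:
--             return True
--
--     # Check for multi-element patterns
--     max_pattern_length = len(sequence) // min_repetitions
--
--     for pattern_length in range(2, max_pattern_length + 1):
--         # Extract the potential pattern from the end of the sequence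
--         if len(sequence) < pattern_length * min_repetitions:
--             continue
--
--         pattern = sequence[-pattern_length:]
--
--         # Count how many times this pattern repeats at the end
--         repetitions = 0
--         for i in range(len(sequence) - pattern_length, -1, -pattern_length):
--             if i + pattern_length <= len(sequence):
--                 current_segment = sequence[i : i + pattern_length]
--                 if current_segment == pattern:
--                     repetitions += 1
--                 else:
--                     break
--
--         if repetitions >= min_repetitions:
--             return True
--
--     return False
-- ===== SOURCE B (Python) =====
-- def is_sequence_looping(sequence: list, min_repetitions: int = 3) -> bool:
--     n = len(sequence)
--     if n < min_repetitions:
--         return False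
--     if min_repetitions <= 1:
--         return True  # any non-empty suffix repeats at least once
--     # a loop with period L exists iff the last min_repetitions*L elements are L-periodic
--     for L in range(1, n // min_repetitions + 1):
--         if all(sequence[n - 1 - i] == sequence[n - 1 - i - L]
--                for i in range((min_repetitions - 1) * L)):
--             return True
--     return False
-- ===== Notes on version B (the rewrite author's own statement) =====
-- stated objective: alternative
-- what changed: Instead of extracting the suffix pattern as a slice for each candidate length and counting how many trailing blocks equal it (with a separate special-cased single-element scan), B checks each candidate period L (including L=1, uniformly) by a single element-wise L-periodicity test over the last min_repetitions*L elements, with a trivial short-circuit for min_repetitions <= 1.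
import Mathlib
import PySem

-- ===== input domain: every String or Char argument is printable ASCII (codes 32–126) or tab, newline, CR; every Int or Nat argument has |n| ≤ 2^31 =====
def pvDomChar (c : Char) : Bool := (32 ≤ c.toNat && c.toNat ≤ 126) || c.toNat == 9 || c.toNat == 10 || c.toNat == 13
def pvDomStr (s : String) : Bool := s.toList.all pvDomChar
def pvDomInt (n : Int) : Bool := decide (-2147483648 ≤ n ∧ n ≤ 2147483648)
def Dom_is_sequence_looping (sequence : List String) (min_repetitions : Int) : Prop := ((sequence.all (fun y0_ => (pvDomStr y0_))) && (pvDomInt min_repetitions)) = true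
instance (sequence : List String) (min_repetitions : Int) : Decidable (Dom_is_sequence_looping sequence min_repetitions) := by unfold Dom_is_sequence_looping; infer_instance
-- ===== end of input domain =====

-- B replaces A's per-pattern-length slice extraction and block-repetition counting by a single
-- direct L-periodicity test on the last min_repetitions*L elements (objective: alternative).

-- ===== PORT A =====
-- the 'count' loop: for i in range(len-1,-1,-1): if seq[i]==last: count+=1 else: break
def aCountRun (seq : List String) (last : String) : List Int → Int → Int
  | [], c => c
  | i :: rest, c =>
      if PySem.List.pyGetD seq i "" = last then aCountRun seq last rest (c + 1) else c

-- the 'repetitions' loop: for i in range(len-L,-1,-L): if i+L<=len: if seq[i:i+L]==pat: reps+=1 else: break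
def aReps (seq : List String) (L : Int) (pat : List String) : List Int → Int → Int
  | [], r => r
  | i :: rest, r =>
      if i + L ≤ (seq.length : Int) then
        if PySem.List.slice seq (some i) (some (i + L)) = pat then aReps seq L pat rest (r + 1)
        else r
      else aReps seq L pat rest r

-- the 'for pattern_length in range(2, max_pattern_length+1)' loop with its early return
def aMulti (seq : List String) (mr : Int) : List Int → Bool
  | [] => false
  | L :: rest =>
      if (seq.length : Int) < L * mr then aMulti seq mr rest
      else
        if mr ≤ aReps seq L (PySem.List.slice seq (some (-L)) none)
              (PySem.List.pyRange ((seq.length : Int) - L) (-1) (-L)) 0 then true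
        else aMulti seq mr rest

def is_sequence_looping (sequence : List String) (min_repetitions : Int) : Bool :=
  let n : Int := (sequence.length : Int)
  if n < min_repetitions then false
  else
    -- 'if len(sequence) >= min_repetitions:' (always true here); sequence[-1] raises IndexError
    -- only on the empty list, which Pre_ excludes — pyGetD's default is never consulted inside Pre_
    let single :=
      if min_repetitions ≤ n then
        decide (min_repetitions ≤
          aCountRun sequence (PySem.List.pyGetD sequence (-1) "")
            (PySem.List.pyRange (n - 1) (-1) (-1)) 0)
      else false
    if single then true
    else
      aMulti sequence min_repetitions
        (PySem.List.pyRange 2 (PySem.Int.floordiv n min_repetitions + 1) 1)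

-- ===== PORT B =====
-- all(sequence[n-1-i] == sequence[n-1-i-L] for i in range((min_repetitions-1)*L))
def bAll (seq : List String) (mr L : Int) : Bool :=
  (PySem.List.pyRange 0 ((mr - 1) * L) 1).all (fun i =>
    PySem.List.pyGetD seq ((seq.length : Int) - 1 - i) "" =
      PySem.List.pyGetD seq ((seq.length : Int) - 1 - i - L) "")

-- 'for L in range(1, n // min_repetitions + 1)' with its early return
def bLoop (seq : List String) (mr : Int) : List Int → Bool
  | [] => false
  | L :: rest => if bAll seq mr L then true else bLoop seq mr rest

def is_sequence_looping_alt (sequence : List String) (min_repetitions : Int) : Bool :=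
  let n : Int := (sequence.length : Int)
  if n < min_repetitions then false
  else if min_repetitions ≤ 1 then true
  else
    bLoop sequence min_repetitions
      (PySem.List.pyRange 1 (PySem.Int.floordiv n min_repetitions + 1) 1)

-- ===== PRECONDITION & SPEC =====
-- Pre_ excludes only the empty sequence with non-positive min_repetitions, where A raises IndexError at sequence[-1].
def Pre_is_sequence_looping (sequence : List String) (min_repetitions : Int) : Prop :=
  sequence ≠ [] ∨ 1 ≤ min_repetitions
instance (sequence : List String) (min_repetitions : Int) : Decidable (Pre_is_sequence_looping sequence min_repetitions) := by unfold Pre_is_sequence_looping; infer_instance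

def pvWitness_is_sequence_looping : List String × Int := (["a", "b", "a", "b", "a", "b"], 3)

def Spec_is_sequence_looping (sequence : List String) (min_repetitions : Int) (out : Bool) : Prop := out = is_sequence_looping_alt sequence min_repetitions
instance (sequence : List String) (min_repetitions : Int) (out : Bool) : Decidable (Spec_is_sequence_looping sequence min_repetitions out) := by unfold Spec_is_sequence_looping; infer_instance

-- ===== CLAIM (what is proved, stated in full; the proofs are below) =====
def Claim_equal_is_sequence_looping : Prop := ∀ (sequence : List String) (min_repetitions : Int), Dom_is_sequence_looping sequence min_repetitions → Pre_is_sequence_looping sequence min_repetitions → Spec_is_sequence_looping sequence min_repetitions (is_sequence_looping sequence min_repetitions)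

-- ===== LEMMAS AND PROOFS =====

-- aCountRun only grows its accumulator
theorem aCountRun_le (seq : List String) (last : String) :
    ∀ (idxs : List Int) (c : Int), c ≤ aCountRun seq last idxs c := by
  intro idxs
  induction idxs with
  | nil => intro c; simp [aCountRun]
  | cons i rest ih =>
    intro c
    simp only [aCountRun]
    split
    · have := ih (c + 1); omega
    · omega

-- A's break-loops as takeWhile lengths
theorem aCountRun_eq (seq : List String) (last : String) :
    ∀ (idxs : List Int) (c : Int),
      aCountRun seq last idxs c =
        c + ((idxs.takeWhile (fun i => decide (PySem.List.pyGetD seq i "" = last))).length : Int) := by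
  intro idxs
  induction idxs with
  | nil => intro c; simp [aCountRun]
  | cons i rest ih =>
    intro c
    simp only [aCountRun, List.takeWhile_cons]
    by_cases h : PySem.List.pyGetD seq i "" = last
    · simp [h, ih (c + 1)]; omega
    · simp [h]

theorem aReps_eq (seq : List String) (L : Int) (pat : List String) :
    ∀ (idxs : List Int) (r : Int), (∀ i ∈ idxs, i + L ≤ (seq.length : Int)) →
      aReps seq L pat idxs r =
        r + ((idxs.takeWhile (fun i =>
          decide (PySem.List.slice seq (some i) (some (i + L)) = pat))).length : Int) := by
  intro idxs
  induction idxs with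
  | nil => intro r _; simp [aReps]
  | cons i rest ih =>
    intro r hg
    simp only [aReps, List.takeWhile_cons]
    rw [if_pos (hg i (by simp))]
    by_cases h : PySem.List.slice seq (some i) (some (i + L)) = pat
    · simp [h, ih (r + 1) (fun x hx => hg x (by simp [hx]))]; omega
    · simp [h]

-- j ≤ |takeWhile p l| ↔ the first j entries exist and satisfy p
theorem takeWhile_len_ge {α : Type} (p : α → Bool) :
    ∀ (l : List α) (j : Nat),
      j ≤ (l.takeWhile p).length ↔ j ≤ l.length ∧ ∀ k, (hk : k < j) → ∀ x ∈ l[k]?, p x = true := by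
  intro l
  induction l with
  | nil => intro j; simp
  | cons a t ih =>
    intro j
    rw [List.takeWhile_cons]
    by_cases h : p a
    · simp only [h, if_pos]
      cases j with
      | zero => simp
      | succ j =>
        simp only [List.length_cons, Nat.succ_le_succ_iff, ih j]
        constructor
        · rintro ⟨h1, h2⟩
          refine ⟨by omega, ?_⟩
          intro k hk x hx
          cases k with
          | zero => simp at hx; subst hx; exact h
          | succ k => exact h2 k (by omega) x (by simpa using hx)
        · rintro ⟨h1, h2⟩
          refine ⟨by omega, ?_⟩
          intro k hk x hx
          exact h2 (k + 1) (by omega) x (by simpa using hx)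
    · simp only [h, if_neg, Bool.false_eq_true, not_false_iff]
      cases j with
      | zero => simp
      | succ j =>
        simp only [List.length_nil]
        constructor
        · omega
        · rintro ⟨h1, h2⟩
          have := h2 0 (by omega) a (by simp)
          simp [this] at h

-- the searched loops are List.any over their ranges
theorem aMulti_eq_any (seq : List String) (mr : Int) :
    ∀ (Ls : List Int), aMulti seq mr Ls = Ls.any (fun L =>
      !decide ((seq.length : Int) < L * mr) &&
      decide (mr ≤ aReps seq L (PySem.List.slice seq (some (-L)) none)
        (PySem.List.pyRange ((seq.length : Int) - L) (-1) (-L)) 0)) := by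
  intro Ls
  induction Ls with
  | nil => simp [aMulti]
  | cons L rest ih =>
    simp only [aMulti, List.any_cons]
    split
    · rename_i h; simp [h, ih]
    · rename_i h
      split
      · rename_i h2; simp [h, h2]
      · rename_i h2; simp [h, h2, ih]

theorem bLoop_eq_any (seq : List String) (mr : Int) :
    ∀ (Ls : List Int), bLoop seq mr Ls = Ls.any (fun L => bAll seq mr L) := by
  intro Ls
  induction Ls with
  | nil => simp [bLoop]
  | cons L rest ih =>
    simp only [bLoop, List.any_cons]
    split <;> simp_all

theorem any_congr_mem {α : Type} (f g : α → Bool) :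
    ∀ (l : List α), (∀ x ∈ l, f x = g x) → l.any f = l.any g := by
  intro l
  induction l with
  | nil => intro _; simp
  | cons a t ih =>
    intro h
    simp only [List.any_cons]
    rw [h a (by simp), ih (fun x hx => h x (by simp [hx]))]

-- two equal-length chunks of seq are equal iff they agree pointwise
theorem chunk_eq_iff (seq : List String) (a b LN : Nat)
    (ha : a + LN ≤ seq.length) (hb : b + LN ≤ seq.length) :
    ((seq.drop a).take LN = (seq.drop b).take LN) ↔
      ∀ t, t < LN → seq.getD (a + t) "" = seq.getD (b + t) "" := by
  constructor
  · intro h t ht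
    have h0 : ((seq.drop a).take LN)[t]? = ((seq.drop b).take LN)[t]? := by rw [h]
    rw [List.getElem?_eq_getElem (by simp; omega), List.getElem?_eq_getElem (by simp; omega)] at h0
    have h1 := Option.some.inj h0
    rw [List.getElem_take, List.getElem_drop, List.getElem_take, List.getElem_drop] at h1
    rw [List.getD_eq_getElem _ _ (by omega), List.getD_eq_getElem _ _ (by omega)]
    exact h1
  · intro h
    apply List.ext_getElem
    · simp; omega
    · intro t h1 h2
      rw [List.getElem_take, List.getElem_drop, List.getElem_take, List.getElem_drop]
      have ht : t < LN := by simp at h1; omega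
      have := h t ht
      rw [List.getD_eq_getElem _ _ (by omega), List.getD_eq_getElem _ _ (by omega)] at this
      exact this

-- the core combinatorial fact: the last mrN·LN elements form mrN equal blocks of length LN
-- iff that suffix is LN-periodic
theorem period_iff (seq : List String) (LN mrN : Nat) (hL : 1 ≤ LN) (hmr : 2 ≤ mrN)
    (hn : mrN * LN ≤ seq.length) :
    (∀ k, k < mrN → ∀ t, t < LN →
        seq.getD (seq.length - (k + 1) * LN + t) "" = seq.getD (seq.length - LN + t) "") ↔
      (∀ i, i < (mrN - 1) * LN →
        seq.getD (seq.length - 1 - i) "" = seq.getD (seq.length - 1 - i - LN) "") := by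
  constructor
  · intro h i hi
    have hr : i % LN < LN := Nat.mod_lt _ (by omega)
    have hdm : LN * (i / LN) + i % LN = i := Nat.div_add_mod i LN
    have hj : i / LN < mrN - 1 := (Nat.div_lt_iff_lt_mul (by omega)).2 hi
    have e1 := h (i / LN) (by omega) (LN - 1 - i % LN) (by omega)
    have e2 := h (i / LN + 1) (by omega) (LN - 1 - i % LN) (by omega)
    have hq1 : (i / LN + 1) * LN = LN * (i / LN) + LN := by ring
    have hq2 : (i / LN + 1 + 1) * LN = LN * (i / LN) + LN + LN := by ring
    have hb : (mrN - 1) * LN + LN = mrN * LN := by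
      have h1 : mrN - 1 + 1 = mrN := by omega
      calc (mrN - 1) * LN + LN = (mrN - 1 + 1) * LN := by ring
        _ = mrN * LN := by rw [h1]
    have hqb : LN * (i / LN) + LN ≤ (mrN - 1) * LN := by
      have h2 : i / LN + 1 ≤ mrN - 1 := by omega
      calc LN * (i / LN) + LN = (i / LN + 1) * LN := by ring
        _ ≤ (mrN - 1) * LN := Nat.mul_le_mul_right _ h2
    rw [hq1] at e1
    rw [hq2] at e2
    have g1 : seq.length - 1 - i = seq.length - (LN * (i / LN) + LN) + (LN - 1 - i % LN) := by omega
    have g2 : seq.length - 1 - i - LN = seq.length - (LN * (i / LN) + LN + LN) + (LN - 1 - i % LN) := by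
      omega
    rw [g2, g1, e1, e2]
  · intro h k hk
    induction k with
    | zero => intro t ht; norm_num
    | succ k ih =>
      intro t ht
      have ihk := ih (by omega) t ht
      have hik : (k + 1) * LN - t - 1 < (mrN - 1) * LN := by
        have h1 : k + 1 ≤ mrN - 1 := by omega
        have h2 : (k + 1) * LN ≤ (mrN - 1) * LN := Nat.mul_le_mul_right _ h1
        have h3 : 1 ≤ (k + 1) * LN := by
          calc 1 ≤ LN := hL
            _ = 1 * LN := (one_mul LN).symm
            _ ≤ (k + 1) * LN := Nat.mul_le_mul_right _ (by omega)
        omega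
      have hp := h ((k + 1) * LN - t - 1) hik
      have hq1 : (k + 1) * LN = k * LN + LN := by ring
      have hq2 : (k + 1 + 1) * LN = k * LN + LN + LN := by ring
      have hb : (mrN - 1) * LN + LN = mrN * LN := by
        have hmm : mrN - 1 + 1 = mrN := by omega
        calc (mrN - 1) * LN + LN = (mrN - 1 + 1) * LN := by ring
          _ = mrN * LN := by rw [hmm]
      have hkb : k * LN + LN + LN ≤ mrN * LN := by
        have h1 : k + 1 + 1 ≤ mrN := by omega
        calc k * LN + LN + LN = (k + 1 + 1) * LN := by ring
          _ ≤ mrN * LN := Nat.mul_le_mul_right _ h1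
      rw [hq1] at hik hp ihk
      rw [hq2]
      have g1 : seq.length - 1 - (k * LN + LN - t - 1) = seq.length - (k * LN + LN) + t := by omega
      have g2 : seq.length - 1 - (k * LN + LN - t - 1) - LN
          = seq.length - (k * LN + LN + LN) + t := by omega
      rw [g2, g1] at hp
      rw [← hp]
      exact ihk
theorem bAll_iff (seq : List String) (mrN LN : Nat) (hmr : 2 ≤ mrN) (hL : 1 ≤ LN)
    (hn : mrN * LN ≤ seq.length) :
    (bAll seq (mrN : Int) (LN : Int) = true) ↔
      ∀ i, i < (mrN - 1) * LN →
        seq.getD (seq.length - 1 - i) "" = seq.getD (seq.length - 1 - i - LN) "" := by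
  unfold bAll
  rw [List.all_eq_true]
  have hcast : ((mrN : Int) - 1) * (LN : Int) = (((mrN - 1) * LN : Nat) : Int) := by
    push_cast [Nat.cast_sub (by omega : 1 ≤ mrN)]; ring
  constructor
  · intro h i hi
    have hmem : (i : Int) ∈ PySem.List.pyRange 0 (((mrN : Int) - 1) * (LN : Int)) 1 := by
      rw [PySem.List.mem_pyRange_one, hcast]
      exact ⟨by positivity, by exact_mod_cast hi⟩
    have hx := h _ hmem
    rw [decide_eq_true_iff] at hx
    have hmul : (mrN - 1) * LN + LN = mrN * LN := by
      have h1 : mrN - 1 + 1 = mrN := by omega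
      calc (mrN - 1) * LN + LN = (mrN - 1 + 1) * LN := by ring
        _ = mrN * LN := by rw [h1]
    have hin : i < seq.length := by omega
    rw [PySem.List.pyGetD_of_nonneg _ _ (by omega),
        PySem.List.pyGetD_of_nonneg _ _ (by omega)] at hx
    have e1 : ((seq.length : Int) - 1 - (i : Int)).toNat = seq.length - 1 - i := by omega
    have e2 : ((seq.length : Int) - 1 - (i : Int) - (LN : Int)).toNat
        = seq.length - 1 - i - LN := by omega
    rw [e1, e2] at hx
    exact hx
  · intro h x hx
    rw [PySem.List.mem_pyRange_one, hcast] at hx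
    obtain ⟨hx0, hx1⟩ := hx
    rw [decide_eq_true_iff]
    have hi : x.toNat < (mrN - 1) * LN := by omega
    have hxx : x = (x.toNat : Int) := by omega
    have hin : x.toNat < seq.length := by
      have h2 : (mrN - 1) * LN + LN = mrN * LN := by
        have h1 : mrN - 1 + 1 = mrN := by omega
        calc (mrN - 1) * LN + LN = (mrN - 1 + 1) * LN := by ring
          _ = mrN * LN := by rw [h1]
      omega
    have hmul : (mrN - 1) * LN + LN = mrN * LN := by
      have h1 : mrN - 1 + 1 = mrN := by omega
      calc (mrN - 1) * LN + LN = (mrN - 1 + 1) * LN := by ring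
        _ = mrN * LN := by rw [h1]
    rw [PySem.List.pyGetD_of_nonneg _ _ (by omega),
        PySem.List.pyGetD_of_nonneg _ _ (by omega)]
    have e1 : ((seq.length : Int) - 1 - x).toNat = seq.length - 1 - x.toNat := by omega
    have e2 : ((seq.length : Int) - 1 - x - (LN : Int)).toNat
        = seq.length - 1 - x.toNat - LN := by omega
    rw [e1, e2]
    exact h x.toNat hi

theorem aReps_iff (seq : List String) (mrN LN : Nat) (hmr : 2 ≤ mrN) (hL : 1 ≤ LN)
    (hn : mrN * LN ≤ seq.length) :
    ((mrN : Int) ≤ aReps seq (LN : Int) (PySem.List.slice seq (some (-(LN : Int))) none)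
        (PySem.List.pyRange ((seq.length : Int) - (LN : Int)) (-1) (-(LN : Int))) 0) ↔
      ∀ k, k < mrN → ∀ t, t < LN →
        seq.getD (seq.length - (k + 1) * LN + t) "" = seq.getD (seq.length - LN + t) "" := by
  have hLpos : (0 : Int) < (LN : Int) := by exact_mod_cast hL
  have h2L : 2 * LN ≤ seq.length := by
    calc 2 * LN ≤ mrN * LN := Nat.mul_le_mul_right _ hmr
      _ ≤ seq.length := hn
  -- the index list
  have hr : PySem.List.pyRange ((seq.length : Int) - (LN : Int)) (-1) (-(LN : Int)) =
      (List.range (seq.length / LN)).map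
        (fun k => (seq.length : Int) - (LN : Int) + -(LN : Int) * (k : Nat)) := by
    rw [PySem.List.pyRange_of_neg _ _ (by omega)]
    rw [if_pos (by omega)]
    have h1 : (seq.length : Int) - (LN : Int) - (-1) + - -(LN : Int) - 1 = (seq.length : Int) := by
      ring
    rw [h1]
    have h2 : ((seq.length : Int) / (- -(LN : Int))).toNat = seq.length / LN := by
      have h3 : - -(LN : Int) = (LN : Int) := by ring
      have h4 : ((seq.length : Int) / (LN : Int)) = ((seq.length / LN : Nat) : Int) :=
        (Int.natCast_div _ _).symm
      rw [h3, h4]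
      exact Int.toNat_natCast _
    rw [h2]
  rw [hr]
  have hguard : ∀ i ∈ (List.range (seq.length / LN)).map
      (fun k => (seq.length : Int) - (LN : Int) + -(LN : Int) * (k : Nat)),
      i + (LN : Int) ≤ (seq.length : Int) := by
    intro i hi
    rw [List.mem_map] at hi
    obtain ⟨k, hk, rfl⟩ := hi
    have hq : -(LN : Int) * ((k : Nat) : Int) = -(((LN * k : Nat)) : Int) := by push_cast; ring
    rw [hq]
    omega
  rw [aReps_eq seq _ _ _ 0 hguard]
  have hcast : ∀ jl : Nat, ((mrN : Int) ≤ 0 + (jl : Int)) ↔ mrN ≤ jl := by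
    intro jl; omega
  rw [hcast]
  rw [takeWhile_len_ge]
  simp only [List.length_map, List.length_range]
  have hm : mrN ≤ seq.length / LN := (Nat.le_div_iff_mul_le (by omega)).2 hn
  constructor
  · intro h k hk t ht
    have hx := h.2 k (by omega) _ (by
      rw [List.getElem?_map, List.getElem?_range (by omega)]
      rfl)
    rw [decide_eq_true_iff] at hx
    beta_reduce at hx
    -- turn the slice equality into pointwise equality
    have hk1 : (k + 1) * LN ≤ mrN * LN := Nat.mul_le_mul_right _ (by omega)
    have hk1' : (k + 1) * LN = k * LN + LN := by ring
    have hq : -(LN : Int) * ((k : Nat) : Int) = -(((k * LN : Nat)) : Int) := by push_cast; ring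
    have ha : (seq.length : Int) - (LN : Int) + -(LN : Int) * (k : Nat)
        = (((seq.length - (k + 1) * LN : Nat)) : Int) := by
      rw [hq]
      omega
    rw [ha] at hx
    rw [PySem.List.slice_toNat _ (by omega) (by omega),
        PySem.List.slice_from_neg_natCast seq LN (by omega)] at hx
    have hb : ((((seq.length - (k + 1) * LN : Nat)) : Int) + (LN : Int)).toNat
        - ((((seq.length - (k + 1) * LN : Nat)) : Int)).toNat = LN := by omega
    have hb2 : ((((seq.length - (k + 1) * LN : Nat)) : Int)).toNat
        = seq.length - (k + 1) * LN := by omega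
    rw [hb, hb2] at hx
    have hpat : List.drop (seq.length - LN) seq
        = List.take LN (List.drop (seq.length - LN) seq) := by
      rw [List.take_of_length_le]
      simp
      omega
    rw [hpat] at hx
    rw [chunk_eq_iff seq _ _ _ (by omega) (by omega)] at hx
    exact hx _ ht
  · intro h
    refine ⟨by omega, ?_⟩
    intro k hk x hx
    rw [List.getElem?_map, List.getElem?_range (by omega)] at hx
    simp only [Option.mem_def, Option.map_some, Option.some.injEq] at hx
    subst hx
    rw [decide_eq_true_iff]
    have hk1 : (k + 1) * LN ≤ mrN * LN := Nat.mul_le_mul_right _ (by omega)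
    have hk1' : (k + 1) * LN = k * LN + LN := by ring
    have hq : -(LN : Int) * ((k : Nat) : Int) = -(((k * LN : Nat)) : Int) := by push_cast; ring
    have ha : (seq.length : Int) - (LN : Int) + -(LN : Int) * (k : Nat)
        = (((seq.length - (k + 1) * LN : Nat)) : Int) := by
      rw [hq]
      omega
    rw [ha]
    rw [PySem.List.slice_toNat _ (by omega) (by omega),
        PySem.List.slice_from_neg_natCast seq LN (by omega)]
    have hb : ((((seq.length - (k + 1) * LN : Nat)) : Int) + (LN : Int)).toNat
        - ((((seq.length - (k + 1) * LN : Nat)) : Int)).toNat = LN := by omega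
    have hb2 : ((((seq.length - (k + 1) * LN : Nat)) : Int)).toNat
        = seq.length - (k + 1) * LN := by omega
    rw [hb, hb2]
    have hpat : List.drop (seq.length - LN) seq
        = List.take LN (List.drop (seq.length - LN) seq) := by
      rw [List.take_of_length_le]
      simp
      omega
    rw [hpat]
    rw [chunk_eq_iff seq _ _ _ (by omega) (by omega)]
    intro t ht
    exact h k hk t ht


theorem count_iff (seq : List String) (mrN : Nat) (hmr : 2 ≤ mrN) (hn : mrN ≤ seq.length) :
    ((mrN : Int) ≤ aCountRun seq (PySem.List.pyGetD seq (-1) "")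
        (PySem.List.pyRange ((seq.length : Int) - 1) (-1) (-1)) 0) ↔
      ∀ k, k < mrN → ∀ t, t < 1 →
        seq.getD (seq.length - (k + 1) * 1 + t) "" = seq.getD (seq.length - 1 + t) "" := by
  have hr : PySem.List.pyRange ((seq.length : Int) - 1) (-1) (-1)
      = (List.range seq.length).map (fun k => (seq.length : Int) - 1 - (k : Nat)) := by
    have h0 := PySem.List.pyRange_neg_one ((seq.length : Int) - 1) (-1)
    have hc : ((seq.length : Int) - 1 - (-1)).toNat = seq.length := by omega
    rw [hc] at h0
    exact h0
  rw [hr]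
  rw [aCountRun_eq]
  have hne : seq ≠ [] := by
    intro hcon
    rw [hcon] at hn
    simp at hn
    omega
  have hlast : PySem.List.pyGetD seq (-1) "" = seq.getD (seq.length - 1) "" := by
    rw [PySem.List.pyGetD_neg_one seq "" hne, List.getLast_eq_getElem,
        List.getD_eq_getElem _ _ (by omega)]
  have hcast : ∀ jl : Nat, ((mrN : Int) ≤ 0 + (jl : Int)) ↔ mrN ≤ jl := by intro jl; omega
  rw [hcast, takeWhile_len_ge]
  simp only [List.length_map, List.length_range]
  constructor
  · intro h k hk t ht
    have hx := h.2 k (by omega) _ (by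
      rw [List.getElem?_map, List.getElem?_range (by omega)]
      rfl)
    rw [decide_eq_true_iff] at hx
    beta_reduce at hx
    rw [hlast, PySem.List.pyGetD_of_nonneg _ _ (by omega)] at hx
    have e1 : ((seq.length : Int) - 1 - (k : Nat)).toNat = seq.length - (k + 1) * 1 := by omega
    rw [e1] at hx
    have e2 : t = 0 := by omega
    subst e2
    simpa using hx
  · intro h
    refine ⟨by omega, ?_⟩
    intro k hk x hx
    rw [List.getElem?_map, List.getElem?_range (by omega)] at hx
    simp only [Option.mem_def, Option.map_some, Option.some.injEq] at hx
    subst hx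
    rw [decide_eq_true_iff]
    rw [hlast, PySem.List.pyGetD_of_nonneg _ _ (by omega)]
    have e1 : ((seq.length : Int) - 1 - (k : Nat)).toNat = seq.length - (k + 1) * 1 := by omega
    rw [e1]
    have := h k hk 0 (by omega)
    simpa using this

theorem per_L_eq (seq : List String) (mrN LN : Nat) (hmr : 2 ≤ mrN) (hL : 1 ≤ LN)
    (hn : mrN * LN ≤ seq.length) :
    decide ((mrN : Int) ≤ aReps seq (LN : Int) (PySem.List.slice seq (some (-(LN : Int))) none)
        (PySem.List.pyRange ((seq.length : Int) - (LN : Int)) (-1) (-(LN : Int))) 0)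
      = bAll seq (mrN : Int) (LN : Int) := by
  rw [Bool.eq_iff_iff, decide_eq_true_iff]
  rw [aReps_iff seq mrN LN hmr hL hn, bAll_iff seq mrN LN hmr hL hn]
  exact period_iff seq LN mrN hL hmr hn

theorem count_eq_bAll_one (seq : List String) (mrN : Nat) (hmr : 2 ≤ mrN)
    (hn : mrN ≤ seq.length) :
    decide ((mrN : Int) ≤ aCountRun seq (PySem.List.pyGetD seq (-1) "")
        (PySem.List.pyRange ((seq.length : Int) - 1) (-1) (-1)) 0)
      = bAll seq (mrN : Int) 1 := by
  rw [Bool.eq_iff_iff, decide_eq_true_iff]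
  rw [count_iff seq mrN hmr hn]
  have h1 : ((1 : Nat) : Int) = (1 : Int) := by norm_num
  rw [← h1]
  rw [bAll_iff seq mrN 1 hmr (by omega) (by omega)]
  exact period_iff seq 1 mrN (by omega) hmr (by omega)

-- the trailing run is at least 1 on a non-empty sequence
theorem count_pos (seq : List String) (hne : seq ≠ []) :
    1 ≤ aCountRun seq (PySem.List.pyGetD seq (-1) "")
      (PySem.List.pyRange ((seq.length : Int) - 1) (-1) (-1)) 0 := by
  have hlen : 1 ≤ seq.length := by
    cases seq with
    | nil => exact absurd rfl hne
    | cons a t => simp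
  rw [PySem.List.pyRange_neg_one_cons (by omega)]
  simp only [aCountRun]
  rw [if_pos]
  · exact aCountRun_le _ _ _ _
  · rw [PySem.List.pyGetD_neg_one seq "" hne, List.getLast_eq_getElem,
        PySem.List.pyGetD_eq_getElem seq "" (by omega) (by omega)]
    congr 1
    omega

theorem bool_ite_or (b c : Bool) : (if b = true then true else c) = (b || c) := by
  cases b <;> simp

-- ===== VERDICT (by name: the statement is the Claim_ definition above) =====
theorem is_sequence_looping_spec : Claim_equal_is_sequence_looping := by
  intro seq mr _ hpre
  unfold Spec_is_sequence_looping
  simp only [is_sequence_looping, is_sequence_looping_alt]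
  by_cases h1 : (seq.length : Int) < mr
  · rw [if_pos h1, if_pos h1]
  · rw [if_neg h1, if_neg h1]
    by_cases h2 : mr ≤ 1
    · rw [if_pos h2]
      have hs : (if mr ≤ (seq.length : Int) then
          decide (mr ≤ aCountRun seq (PySem.List.pyGetD seq (-1) "")
            (PySem.List.pyRange ((seq.length : Int) - 1) (-1) (-1)) 0)
          else false) = true := by
        rw [if_pos (show mr ≤ (seq.length : Int) by omega), decide_eq_true_iff]
        by_cases h3 : mr ≤ 0
        · have := aCountRun_le seq (PySem.List.pyGetD seq (-1) "")
            (PySem.List.pyRange ((seq.length : Int) - 1) (-1) (-1)) 0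
          omega
        · have hne : seq ≠ [] := by
            intro hcon
            rw [hcon] at h1
            simp at h1
            omega
          have := count_pos seq hne
          omega
      rw [hs]
      simp
    · rw [if_neg h2]
      -- the main case: 2 ≤ min_repetitions ≤ len
      obtain ⟨mrN, rfl⟩ : ∃ mrN : Nat, mr = (mrN : Int) := ⟨mr.toNat, by omega⟩
      have hmr2 : 2 ≤ mrN := by omega
      have hlen : mrN ≤ seq.length := by omega
      have hM : PySem.Int.floordiv (seq.length : Int) (mrN : Int)
          = ((seq.length / mrN : Nat) : Int) := by
        rw [PySem.Int.floordiv_eq_ediv_of_pos (by omega)]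
        exact (Int.natCast_div _ _).symm
      rw [hM]
      have hM1 : 1 ≤ seq.length / mrN := (Nat.one_le_div_iff (by omega)).2 hlen
      rw [PySem.List.pyRange_one_cons (a := 1) (by omega)]
      rw [bLoop_eq_any, List.any_cons]
      rw [if_pos (by omega : (mrN : Int) ≤ (seq.length : Int)), bool_ite_or, aMulti_eq_any]
      have hone : (1 : Int) + 1 = 2 := by norm_num
      rw [hone]
      congr 1
      · exact count_eq_bAll_one seq mrN hmr2 hlen
      · apply any_congr_mem
        intro L hL
        rw [PySem.List.mem_pyRange_one] at hL
        obtain ⟨hL2, hLM⟩ := hL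
        obtain ⟨LN, rfl⟩ : ∃ LN : Nat, L = (LN : Int) := ⟨L.toNat, by omega⟩
        have hLN1 : 1 ≤ LN := by omega
        have hLd : LN ≤ seq.length / mrN := by omega
        have hmul' : LN * mrN ≤ seq.length := (Nat.le_div_iff_mul_le (by omega : 0 < mrN)).1 hLd
        have hmul : mrN * LN ≤ seq.length := by
          calc mrN * LN = LN * mrN := Nat.mul_comm _ _
            _ ≤ seq.length := hmul'
        have hnotlt : ¬ ((seq.length : Int) < (LN : Int) * (mrN : Int)) := by
          have hc : ((LN * mrN : Nat) : Int) = (LN : Int) * (mrN : Int) := by push_cast; ring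
          omega
        rw [decide_eq_false hnotlt]
        simp only [Bool.not_false, Bool.true_and]
        exact per_L_eq seq mrN LN hmr2 hLN1 hmul
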